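-- pv_equiv track=rewrite | github.com/skn11-algorithm/week08 | bsi/2655.py | min_black_to_white
-- ===== SOURCE A (Python) =====
-- from collections import deque
--
-- def min_black_to_white(grid, n):
--     # 상하좌우 이동을 위한 방향 벡터
--     dx = [-1, 1, 0, 0]
--     dy = [0, 0, -1, 1]
--
--     # 방문 체크 및 최소 변환 횟수 저장 배열
--     # 초기값을 무한대로 설정
--     visited = [[float('inf')] * n for _ in range(n)]
--
--     # 덱 초기화 (시작 위치: (0, 0))
--     queue = deque([(0, 0, 0)])  # (x, y, 변환 횟수)
--     visited[0][0] = 0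
--
--     while queue:
--         x, y, changes = queue.popleft()
--
--         # 현재 위치가 이미 더 적은 변환으로 방문한 적이 있다면 스킵
--         if changes > visited[x][y]:
--             continue
--
--         # 끝방에 도달했다면 현재까지의 변환 횟수 반환
--         if x == n-1 and y == n-1:
--             return changes
--
--         # 모든 방향 탐색
--         for i in range(4):
--             nx, ny = x + dx[i], y + dy[i]
--
--             # 바둑판 범위 내에 있는지 확인
--             if 0 <= nx < n and 0 <= ny < n:
--                 # 흰 방인 경우 (가중치 0)
--                 if grid[nx][ny] == 1:
--                     if changes < visited[nx][ny]:
--                         visited[nx][ny] = changes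
--                         # 가중치 0인 간선은 큐의 앞에 추가
--                         queue.appendleft((nx, ny, changes))
--                 # 검은 방인 경우 (가중치 1)
--                 else:
--                     if changes + 1 < visited[nx][ny]:
--                         visited[nx][ny] = changes + 1
--                         # 가중치 1인 간선은 큐의 뒤에 추가
--                         queue.append((nx, ny, changes + 1))
--
--     # 끝방에 도달할 수 없는 경우 (이 문제에서는 발생하지 않음)
--     return -1
-- ===== SOURCE B (Python) =====
-- def min_black_to_white(grid, n):
--     # Gauss-Seidel / Bellman-Ford style: repeatedly sweep a distance table,
--     # relaxing every cell's in-range neighbours, until a full sweep changes nothing.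
--     INF = float('inf')
--     dist = [[INF] * n for _ in range(n)]
--     dist[0][0] = 0
--     while True:
--         changed = False
--         for x in range(n):
--             for y in range(n):
--                 d = dist[x][y]
--                 if d == INF:
--                     continue
--                 for nx, ny in ((x - 1, y), (x + 1, y), (x, y - 1), (x, y + 1)):
--                     if 0 <= nx < n and 0 <= ny < n:
--                         nd = d + (0 if grid[nx][ny] == 1 else 1)
--                         if nd < dist[nx][ny]:
--                             dist[nx][ny] = nd
--                             changed = True
--         if not changed:
--             break
--     d = dist[n - 1][n - 1]
--     return -1 if d == INF else d
-- ===== Notes on version B (the rewrite author's own statement) =====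
-- stated objective: alternative
-- what changed: A's 0-1 BFS (deque with appendleft/append and a visited matrix) is replaced by Bellman-Ford-style Gauss-Seidel relaxation: repeatedly sweep the whole distance table, relaxing every cell's four neighbours, until a full sweep changes nothing; both return the 0-1 shortest-path cost to the corner.
-- outside the precondition, e.g. on min_black_to_white([[1, 0], [1, 0], [1, 1, 1]], 3): A returns 0, B raises IndexError
import Mathlib
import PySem

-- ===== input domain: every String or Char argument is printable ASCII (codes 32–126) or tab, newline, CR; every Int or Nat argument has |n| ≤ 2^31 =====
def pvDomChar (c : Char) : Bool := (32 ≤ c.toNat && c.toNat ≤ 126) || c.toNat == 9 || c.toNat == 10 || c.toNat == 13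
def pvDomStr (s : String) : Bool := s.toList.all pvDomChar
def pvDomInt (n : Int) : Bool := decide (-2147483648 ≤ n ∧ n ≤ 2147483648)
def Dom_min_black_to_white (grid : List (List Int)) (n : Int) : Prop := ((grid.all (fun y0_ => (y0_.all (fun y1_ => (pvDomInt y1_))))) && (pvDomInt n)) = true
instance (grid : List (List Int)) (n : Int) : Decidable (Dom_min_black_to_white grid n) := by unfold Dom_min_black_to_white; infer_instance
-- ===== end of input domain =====

-- B replaces A's 0-1 BFS (deque) by Bellman–Ford-style sweeps of a distance table
-- repeated until a fixpoint; same return value, a different algorithm (objective: alternative).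

-- ===== PORT A =====

/-- `grid[x][y]` (none = IndexError). -/
def pvGrid (grid : List (List Int)) (x y : Int) : Option Int :=
  (PySem.List.pyGet? grid x).bind (fun r => PySem.List.pyGet? r y)

/-- `changes > visited[x][y]` where `none` plays `float('inf')`. -/
def pvGtInf (ch : Int) (v : Option Int) : Bool :=
  match v with | none => false | some w => decide (w < ch)

/-- `nd < visited[nx][ny]` where `none` plays `float('inf')`. -/
def pvLtInf (ch : Int) (v : Option Int) : Bool :=
  match v with | none => true | some w => decide (ch < w)

/-- `zip(dx, dy)` for A's `dx = [-1,1,0,0]`, `dy = [0,0,-1,1]`. -/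
def pvDirs : List (Int × Int) := [(-1, 0), (1, 0), (0, -1), (0, 1)]

/-- Body of A's `for i in range(4)` loop: one neighbour relaxation, evolving
(queue, visited); `appendleft` is cons, `append` is `++ [·]`.
(Python raises IndexError where `pvGrid` is `none`; that is outside `Pre_`,
there this port reads the missing cell as black.) -/
def pvStepA (grid : List (List Int)) (n x y ch : Int)
    (st : List (Int × Int × Int) × ((Int × Int) → Option Int)) (d : Int × Int) :
    List (Int × Int × Int) × ((Int × Int) → Option Int) :=
  let nx := x + d.1
  let ny := y + d.2
  if 0 ≤ nx ∧ nx < n ∧ 0 ≤ ny ∧ ny < n then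
    if pvGrid grid nx ny = some 1 then
      if pvLtInf ch (st.2 (nx, ny)) then
        ((nx, ny, ch) :: st.1, fun c => if c = (nx, ny) then some ch else st.2 c)
      else st
    else
      if pvLtInf (ch + 1) (st.2 (nx, ny)) then
        (st.1 ++ [(nx, ny, ch + 1)], fun c => if c = (nx, ny) then some (ch + 1) else st.2 c)
      else st
  else st

/-- Fuel majorising the number of `while queue:` iterations (proved sufficient under `Pre_`). -/
def pvFuelA (n : Int) : Nat := (n.toNat * n.toNat + 2) * (n.toNat * n.toNat + 2)

/-- A's `while queue:` loop; the visited matrix is kept as a function. -/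
def pvLoopA (grid : List (List Int)) (n : Int) :
    Nat → List (Int × Int × Int) → ((Int × Int) → Option Int) → Int
  | 0, _, _ => -1
  | _ + 1, [], _ => -1
  | fuel + 1, (x, y, ch) :: rest, vis =>
    if pvGtInf ch (vis (x, y)) then pvLoopA grid n fuel rest vis
    else if x = n - 1 ∧ y = n - 1 then ch
    else
      let st := pvDirs.foldl (pvStepA grid n x y ch) (rest, vis)
      pvLoopA grid n fuel st.1 st.2

def min_black_to_white (grid : List (List Int)) (n : Int) : Int :=
  pvLoopA grid n (pvFuelA n) [(0, 0, 0)] (fun c => if c = (0, 0) then some 0 else none)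

-- ===== PORT B =====

/-- One neighbour relaxation of B's sweep: state is (dist, changed). -/
def pvStepB (grid : List (List Int)) (n d : Int)
    (st : ((Int × Int) → Option Int) × Bool) (p : Int × Int) :
    ((Int × Int) → Option Int) × Bool :=
  let nx := p.1
  let ny := p.2
  if 0 ≤ nx ∧ nx < n ∧ 0 ≤ ny ∧ ny < n then
    let nd := d + (if pvGrid grid nx ny = some 1 then 0 else 1)
    if pvLtInf nd (st.1 (nx, ny)) then
      (fun c => if c = (nx, ny) then some nd else st.1 c, true)
    else st
  else st

/-- Body of B's sweep for one cell `(x, y)`. -/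
def pvCellB (grid : List (List Int)) (n : Int)
    (st : ((Int × Int) → Option Int) × Bool) (x y : Int) :
    ((Int × Int) → Option Int) × Bool :=
  match st.1 (x, y) with
  | none => st
  | some d => [(x - 1, y), (x + 1, y), (x, y - 1), (x, y + 1)].foldl (pvStepB grid n d) st

/-- One full `for x in range(n): for y in range(n):` sweep. -/
def pvSweepB (grid : List (List Int)) (n : Int)
    (st : ((Int × Int) → Option Int) × Bool) : ((Int × Int) → Option Int) × Bool :=
  (PySem.List.pyRange 0 n 1).foldl
    (fun st x => (PySem.List.pyRange 0 n 1).foldl (fun st y => pvCellB grid n st x y) st) st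

/-- Fuel majorising the number of `while True:` sweeps (proved sufficient under `Pre_`). -/
def pvFuelB (n : Int) : Nat := n.toNat * n.toNat * (n.toNat * n.toNat + 2) + 2

/-- B's `while True:` loop: sweep until no change. -/
def pvLoopB (grid : List (List Int)) (n : Int) :
    Nat → ((Int × Int) → Option Int) → ((Int × Int) → Option Int)
  | 0, dist => dist
  | fuel + 1, dist =>
    let st := pvSweepB grid n (dist, false)
    if st.2 then pvLoopB grid n fuel st.1 else st.1

def min_black_to_white_alt (grid : List (List Int)) (n : Int) : Int :=
  let dist := pvLoopB grid n (pvFuelB n) (fun c => if c = (0, 0) then some 0 else none)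
  match dist (n - 1, n - 1) with
  | none => -1
  | some d => d

-- ===== PRECONDITION & SPEC =====

-- Pre_ requires n ≥ 1 (A raises IndexError on `visited[0][0]` for n ≤ 0) and, unless n = 1
-- (where A returns 0 before touching grid), that grid covers the full n×n board: it thereby
-- excludes rare partial grids on which A happens to return because the goal is popped before a
-- missing cell is probed (A raises IndexError on the rest), while B reads every in-range cell.
def Pre_min_black_to_white (grid : List (List Int)) (n : Int) : Prop :=
  1 ≤ n ∧ (n = 1 ∨ ((n : Int) ≤ (grid.length : Int) ∧ ∀ row ∈ grid.take n.toNat, (n : Int) ≤ (row.length : Int)))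
instance (grid : List (List Int)) (n : Int) : Decidable (Pre_min_black_to_white grid n) := by
  unfold Pre_min_black_to_white; infer_instance

def pvWitness_min_black_to_white : List (List Int) × Int := ([[1, 0], [0, 1]], 2)

def Spec_min_black_to_white (grid : List (List Int)) (n : Int) (out : Int) : Prop := out = min_black_to_white_alt grid n
instance (grid : List (List Int)) (n : Int) (out : Int) : Decidable (Spec_min_black_to_white grid n out) := by unfold Spec_min_black_to_white; infer_instance

-- ===== CLAIM (what is proved, stated in full; the proofs are below) =====
def Claim_equal_min_black_to_white : Prop := ∀ (grid : List (List Int)) (n : Int), Dom_min_black_to_white grid n → Pre_min_black_to_white grid n → Spec_min_black_to_white grid n (min_black_to_white grid n)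

-- ===== LEMMAS AND PROOFS =====

/-- Cell in the n×n board. -/
def InR (n : Int) (c : Int × Int) : Prop := 0 ≤ c.1 ∧ c.1 < n ∧ 0 ≤ c.2 ∧ c.2 < n

/-- Grid adjacency (the four directions). -/
def Adj (c c' : Int × Int) : Prop :=
  c' = (c.1 - 1, c.2) ∨ c' = (c.1 + 1, c.2) ∨ c' = (c.1, c.2 - 1) ∨ c' = (c.1, c.2 + 1)

/-- Cost of entering a cell: 0 for white (`grid == 1`), 1 otherwise. -/
def wN (grid : List (List Int)) (c : Int × Int) : ℕ :=
  if pvGrid grid c.1 c.2 = some 1 then 0 else 1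

/-- `Rch grid n k c`: cell `c` is reachable from (0,0) at total cost `k`
(cost of each entered cell, start not counted). -/
inductive Rch (grid : List (List Int)) (n : Int) : ℕ → (Int × Int) → Prop where
  | zero : Rch grid n 0 (0, 0)
  | step {k : ℕ} {c c' : Int × Int} :
      Rch grid n k c → Adj c c' → InR n c' → Rch grid n (k + wN grid c') c'

/-- The 0-1 shortest-path value both programs compute. -/
noncomputable def delta (grid : List (List Int)) (n : Int) (c : Int × Int) : ℕ :=
  sInf {k | Rch grid n k c}

/-- Finite and at most `k` (with `none` = ∞). -/
def vLE (v : Option Int) (k : Int) : Prop := ∃ w, v = some w ∧ w ≤ k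

/-- All in-range neighbours of `c` are at most `d` + entry cost. -/
def RelaxedAt (grid : List (List Int)) (n : Int) (vis : (Int × Int) → Option Int)
    (c : Int × Int) (d : Int) : Prop :=
  ∀ c', Adj c c' → InR n c' → vLE (vis c') (d + (wN grid c' : Int))

/-- The in-range cells as a finset. -/
def cells (n : Int) : Finset (Int × Int) :=
  (Finset.range n.toNat ×ˢ Finset.range n.toNat).image (fun p => ((p.1 : Int), (p.2 : Int)))

noncomputable def capA (grid : List (List Int)) (n : Int) (v : Option Int) : ℕ :=
  match v with
  | none => delta grid n (n - 1, n - 1) + 3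
  | some w => w.toNat + 1

/-- Termination potential of A's loop. -/
noncomputable def PhiA (grid : List (List Int)) (n : Int) (q : List (Int × Int × Int))
    (vis : (Int × Int) → Option Int) : ℕ :=
  q.length + ∑ c ∈ cells n, capA grid n (vis c)

/-- Loop invariant of A's 0-1 BFS. -/
structure InvA (grid : List (List Int)) (n : Int) (q : List (Int × Int × Int))
    (vis : (Int × Int) → Option Int) : Prop where
  vstart : vis (0, 0) = some 0
  vreal : ∀ c v, vis c = some v → 0 ≤ v ∧ Rch grid n v.toNat c
  vbound : ∀ c v, vis c = some v → v ≤ (delta grid n (n - 1, n - 1) : Int) + 1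
  qmem : ∀ e ∈ q, InR n (e.1, e.2.1) ∧ 0 ≤ e.2.2 ∧ Rch grid n e.2.2.toNat (e.1, e.2.1) ∧
          vLE (vis (e.1, e.2.1)) e.2.2
  qsorted : q.Pairwise (fun a b => a.2.2 ≤ b.2.2)
  qspread : ∀ a ∈ q, ∀ b ∈ q, a.2.2 ≤ b.2.2 + 1
  hgoal : ∀ v, vis (n - 1, n - 1) = some v → ∃ e ∈ q, e = (n - 1, n - 1, v)
  hcover : ∀ c v, vis c = some v →
            (∃ e ∈ q, e = (c.1, c.2, v)) ∨ RelaxedAt grid n vis c v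

/-- Mid-relaxation invariant while A processes the four directions of `(x, y)`. -/
structure MidA (grid : List (List Int)) (n x y ch : Int) (rest : List (Int × Int × Int))
    (st : List (Int × Int × Int) × ((Int × Int) → Option Int)) : Prop where
  vstart : st.2 (0, 0) = some 0
  vreal : ∀ c v, st.2 c = some v → 0 ≤ v ∧ Rch grid n v.toNat c
  vbound : ∀ c v, st.2 c = some v → v ≤ (delta grid n (n - 1, n - 1) : Int) + 1
  qmem : ∀ e ∈ st.1, InR n (e.1, e.2.1) ∧ 0 ≤ e.2.2 ∧ Rch grid n e.2.2.toNat (e.1, e.2.1) ∧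
          vLE (st.2 (e.1, e.2.1)) e.2.2
  qform : ∃ F B, st.1 = F ++ rest ++ B ∧ (∀ e ∈ F, e.2.2 = ch) ∧ (∀ e ∈ B, e.2.2 = ch + 1)
  hxy : st.2 (x, y) = some ch
  hgoal : ∀ v, st.2 (n - 1, n - 1) = some v → ∃ e ∈ st.1, e = (n - 1, n - 1, v)
  hcover : ∀ c v, st.2 c = some v → c ≠ (x, y) →
            (∃ e ∈ st.1, e = (c.1, c.2, v)) ∨ RelaxedAt grid n st.2 c v

/-- Pointwise decrease of distance tables. -/
def decr (f f' : (Int × Int) → Option Int) : Prop :=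
  ∀ c w, f c = some w → ∃ w', f' c = some w' ∧ w' ≤ w

lemma vLE_mono {f f' : (Int × Int) → Option Int} (h : decr f f') {c k} :
    vLE (f c) k → vLE (f' c) k := by
  rintro ⟨w, hw, hwk⟩
  obtain ⟨w', hw', hle⟩ := h c w hw
  exact ⟨w', hw', le_trans hle hwk⟩

lemma relaxed_mono {grid n} {f f' : (Int × Int) → Option Int} (h : decr f f') {c d} :
    RelaxedAt grid n f c d → RelaxedAt grid n f' c d := by
  intro hr c' hadj hin
  exact vLE_mono h (hr c' hadj hin)

lemma mem_cells {n : Int} {c : Int × Int} : c ∈ cells n ↔ InR n c := by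
  constructor
  · intro h
    simp only [cells, Finset.mem_image, Finset.mem_product, Finset.mem_range] at h
    obtain ⟨p, ⟨h1, h2⟩, rfl⟩ := h
    refine ⟨?_, ?_, ?_, ?_⟩ <;> simp <;> omega
  · rintro ⟨h1, h2, h3, h4⟩
    simp only [cells, Finset.mem_image, Finset.mem_product, Finset.mem_range]
    exact ⟨(c.1.toNat, c.2.toNat), ⟨by omega, by omega⟩, by simp [Prod.ext_iff]; omega⟩

lemma card_cells {n : Int} : (cells n).card ≤ n.toNat * n.toNat := by
  calc (cells n).card ≤ ((Finset.range n.toNat) ×ˢ (Finset.range n.toNat)).card :=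
        Finset.card_image_le
    _ = n.toNat * n.toNat := by simp

lemma sum_update {S : Finset (Int × Int)} {f : (Int × Int) → Option Int} {c₀ : Int × Int}
    (h : c₀ ∈ S) (v : Option Int) (cap : Option Int → ℕ) :
    (∑ c ∈ S, cap (if c = c₀ then v else f c)) + cap (f c₀)
      = (∑ c ∈ S, cap (f c)) + cap v := by
  rw [← Finset.add_sum_erase S _ h, ← Finset.add_sum_erase S (fun c => cap (f c)) h]
  have : ∀ c ∈ S.erase c₀, cap (if c = c₀ then v else f c) = cap (f c) := by
    intro c hc
    simp [Finset.ne_of_mem_erase hc]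
  rw [Finset.sum_congr rfl this]
  simp
  ring

lemma adj_ne {c c' : Int × Int} (h : Adj c c') : c' ≠ c := by
  rcases h with h | h | h | h <;> subst h <;>
    (intro he; rw [Prod.ext_iff] at he; omega)

lemma adj_dirs {x y : Int} : ∀ d ∈ pvDirs, Adj (x, y) (x + d.1, y + d.2) := by
  intro d hd
  fin_cases hd <;> simp [Adj, Prod.ext_iff] <;> omega

lemma wN_le_one {grid : List (List Int)} {c : Int × Int} : wN grid c ≤ 1 := by
  unfold wN; split <;> omega

lemma reach_aux {grid : List (List Int)} {n : Int} :
    ∀ (m : ℕ) (c : Int × Int), (c.1 + c.2).toNat ≤ m → InR n c →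
      ∃ k, k ≤ (c.1 + c.2).toNat ∧ Rch grid n k c := by
  intro m
  induction m with
  | zero =>
    rintro ⟨a, b⟩ hm ⟨h1, h2, h3, h4⟩
    have : a = 0 ∧ b = 0 := by simp at hm ⊢; omega
    obtain ⟨rfl, rfl⟩ := this
    exact ⟨0, le_rfl, Rch.zero⟩
  | succ m ih =>
    rintro ⟨a, b⟩ hm ⟨h1, h2, h3, h4⟩
    by_cases h0 : a = 0 ∧ b = 0
    · obtain ⟨rfl, rfl⟩ := h0
      exact ⟨0, by simp, Rch.zero⟩
    by_cases ha : 0 < a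
    · obtain ⟨k, hk, hr⟩ := ih (a - 1, b) (by simp; omega) ⟨by simp; omega, by simp; omega, h3, h4⟩
      refine ⟨k + wN grid (a, b), ?_, ?_⟩
      · have := wN_le_one (grid := grid) (c := (a, b))
        simp at hk ⊢; omega
      · exact Rch.step hr (Or.inr (Or.inl (by simp))) ⟨h1, h2, h3, h4⟩
    · have hb : 0 < b := by omega
      obtain ⟨k, hk, hr⟩ := ih (a, b - 1) (by simp; omega) ⟨h1, h2, by simp; omega, by simp; omega⟩
      refine ⟨k + wN grid (a, b), ?_, ?_⟩
      · have := wN_le_one (grid := grid) (c := (a, b))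
        simp at hk ⊢; omega
      · exact Rch.step hr (Or.inr (Or.inr (Or.inr (by simp)))) ⟨h1, h2, h3, h4⟩

lemma reach_exists {grid : List (List Int)} {n : Int} :
    ∀ c : Int × Int, InR n c → ∃ k, k ≤ (c.1 + c.2).toNat ∧ Rch grid n k c :=
  fun c hc => reach_aux _ c le_rfl hc

lemma delta_le {grid n k c} (h : Rch grid n k c) : delta grid n c ≤ k :=
  Nat.sInf_le h

lemma rch_delta {grid : List (List Int)} {n : Int} {c} (hne : ∃ k, Rch grid n k c) :
    Rch grid n (delta grid n c) c :=
  Nat.sInf_mem hne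

lemma delta_goal_bound {grid : List (List Int)} {n : Int} (hn : 1 ≤ n) :
    delta grid n (n - 1, n - 1) ≤ ((n - 1) + (n - 1)).toNat := by
  obtain ⟨k, hk, hr⟩ := reach_exists (grid := grid) (n := n) (n - 1, n - 1)
    ⟨by omega, by omega, by omega, by omega⟩
  exact le_trans (delta_le hr) hk

lemma coverA_le {grid n q vis} (h : InvA grid n q vis) :
    ∀ {k c}, Rch grid n k c → vLE (vis c) (k : Int) ∨ ∃ e ∈ q, e.2.2 ≤ (k : Int) := by
  intro k c hr
  induction hr with
  | zero => exact Or.inl ⟨0, h.vstart, by simp⟩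
  | @step k c c' hr hadj hinr ih =>
    rcases ih with ⟨w, hw, hwk⟩ | ⟨e, he, hek⟩
    · rcases h.hcover _ _ hw with ⟨e, he, heq⟩ | hrel
      · refine Or.inr ⟨e, he, ?_⟩
        rw [heq]; push_cast; omega
      · obtain ⟨w', hw', hle⟩ := hrel c' hadj hinr
        exact Or.inl ⟨w', hw', by push_cast at hle ⊢; omega⟩
    · exact Or.inr ⟨e, he, by push_cast; omega⟩

lemma headA_le {grid n x y ch rest vis} (hn : 1 ≤ n)
    (h : InvA grid n ((x, y, ch) :: rest) vis) :
    ch ≤ (delta grid n (n - 1, n - 1) : Int) := by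
  have hg : InR n (n - 1, n - 1) := ⟨by omega, by omega, by omega, by omega⟩
  have hne : ∃ k, Rch grid n k (n - 1, n - 1) :=
    (reach_exists _ hg).imp fun k hk => hk.2
  have hmin : ∀ e ∈ (x, y, ch) :: rest, ch ≤ e.2.2 := by
    intro e he
    rcases List.mem_cons.mp he with rfl | he'
    · exact le_rfl
    · exact (List.pairwise_cons.mp h.qsorted).1 e he'
  rcases coverA_le h (rch_delta hne) with ⟨v, hv, hvk⟩ | ⟨e, he, hek⟩
  · obtain ⟨e, he, heq⟩ := h.hgoal v hv
    have := hmin e he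
    rw [heq] at this
    simpa using le_trans this hvk
  · exact le_trans (hmin e he) hek

lemma not_emptyA {grid n vis} (hn : 1 ≤ n) (h : InvA grid n [] vis) : False := by
  have key : ∀ (m : ℕ) (c : Int × Int), (c.1 + c.2).toNat ≤ m → InR n c →
      ∃ v, vis c = some v := by
    intro m
    induction m with
    | zero =>
      rintro ⟨a, b⟩ hm ⟨h1, h2, h3, h4⟩
      have : a = 0 ∧ b = 0 := by simp at hm ⊢; omega
      obtain ⟨rfl, rfl⟩ := this
      exact ⟨0, h.vstart⟩
    | succ m ih =>
      rintro ⟨a, b⟩ hm ⟨h1, h2, h3, h4⟩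
      by_cases h0 : a = 0 ∧ b = 0
      · obtain ⟨rfl, rfl⟩ := h0
        exact ⟨0, h.vstart⟩
      have main : ∀ p : Int × Int, InR n p → Adj p (a, b) → (p.1 + p.2).toNat ≤ m →
          ∃ v, vis (a, b) = some v := by
        intro p hp hadj hpm
        obtain ⟨d, hd⟩ := ih p hpm hp
        rcases h.hcover p d hd with ⟨e, he, _⟩ | hrel
        · simp at he
        · obtain ⟨w, hw, _⟩ := hrel (a, b) hadj ⟨h1, h2, h3, h4⟩
          exact ⟨w, hw⟩
      by_cases ha : 0 < a
      · exact main (a - 1, b) ⟨by simp; omega, by simp; omega, h3, h4⟩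
          (Or.inr (Or.inl (by simp))) (by simp at hm ⊢; omega)
      · exact main (a, b - 1) ⟨h1, h2, by simp; omega, by simp; omega⟩
          (Or.inr (Or.inr (Or.inr (by simp)))) (by simp at hm ⊢; omega)
  obtain ⟨v, hv⟩ := key ((n - 1) + (n - 1)).toNat (n - 1, n - 1) (by simp)
    ⟨by omega, by omega, by omega, by omega⟩
  obtain ⟨e, he, _⟩ := h.hgoal v hv
  simp at he

lemma capA_none {grid n} : capA grid n none = delta grid n (n - 1, n - 1) + 3 := rfl
lemma capA_some {grid n w} : capA grid n (some w) = w.toNat + 1 := rfl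

lemma stepA_pres {grid : List (List Int)} {n x y ch : Int} {rest} {st} (d : Int × Int)
    (hd : Adj (x, y) (x + d.1, y + d.2))
    (hch : 0 ≤ ch) (hRxy : Rch grid n ch.toNat (x, y))
    (hle : ch ≤ (delta grid n (n - 1, n - 1) : Int))
    (hM : MidA grid n x y ch rest st) :
    MidA grid n x y ch rest (pvStepA grid n x y ch st d)
    ∧ decr st.2 (pvStepA grid n x y ch st d).2
    ∧ (InR n (x + d.1, y + d.2) →
        vLE ((pvStepA grid n x y ch st d).2 (x + d.1, y + d.2))
          (ch + (wN grid (x + d.1, y + d.2) : Int)))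
    ∧ PhiA grid n (pvStepA grid n x y ch st d).1 (pvStepA grid n x y ch st d).2
        ≤ PhiA grid n st.1 st.2 := by
  obtain ⟨F, B, hq, hF, hB⟩ := hM.qform
  have hne_xy : ((x + d.1, y + d.2) : Int × Int) ≠ (x, y) := adj_ne hd
  simp only [pvStepA]
  by_cases hin : 0 ≤ x + d.1 ∧ x + d.1 < n ∧ 0 ≤ y + d.2 ∧ y + d.2 < n
  case neg =>
    rw [if_neg hin]
    exact ⟨hM, fun c w hw => ⟨w, hw, le_rfl⟩, fun hr => absurd hr hin, le_rfl⟩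
  case pos =>
  have hInRnbr : InR n (x + d.1, y + d.2) := hin
  have hmemc : ((x + d.1, y + d.2) : Int × Int) ∈ cells n := mem_cells.mpr hInRnbr
  rw [if_pos hin]
  by_cases hw : pvGrid grid (x + d.1) (y + d.2) = some 1
  case pos =>
    have hwn : wN grid (x + d.1, y + d.2) = 0 := by simp [wN, hw]
    rw [if_pos hw]
    by_cases hlt : pvLtInf ch (st.2 (x + d.1, y + d.2)) = true
    case neg =>
      rw [if_neg hlt]
      refine ⟨hM, fun c w hw => ⟨w, hw, le_rfl⟩, ?_, le_rfl⟩
      intro _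
      cases hv : st.2 (x + d.1, y + d.2) with
      | none => rw [hv] at hlt; simp [pvLtInf] at hlt
      | some w =>
        rw [hv] at hlt; simp [pvLtInf] at hlt
        exact ⟨w, rfl, by rw [hwn]; push_cast; omega⟩
    case pos =>
      rw [if_pos hlt]
      have hreal_new : Rch grid n ch.toNat (x + d.1, y + d.2) := by
        have := Rch.step hRxy hd hInRnbr
        rwa [hwn, Nat.add_zero] at this
      have hdecr : decr st.2
          (fun c => if c = (x + d.1, y + d.2) then some ch else st.2 c) := by
        intro c w hcw
        by_cases hc : c = (x + d.1, y + d.2)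
        · subst hc
          rw [hcw] at hlt; simp [pvLtInf] at hlt
          exact ⟨ch, by simp, le_of_lt hlt⟩
        · exact ⟨w, by simp [hc, hcw], le_rfl⟩
      have h00 : ((0, 0) : Int × Int) ≠ (x + d.1, y + d.2) := by
        intro h00
        rw [← h00, hM.vstart] at hlt
        simp [pvLtInf] at hlt
        omega
      refine ⟨⟨?_, ?_, ?_, ?_, ?_, ?_, ?_, ?_⟩, hdecr, ?_, ?_⟩
      · simpa [h00] using hM.vstart
      · intro c v hcv
        by_cases hc : c = (x + d.1, y + d.2)
        · subst hc; simp at hcv; exact hcv ▸ ⟨hch, hreal_new⟩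
        · simp [hc] at hcv; exact hM.vreal c v hcv
      · intro c v hcv
        by_cases hc : c = (x + d.1, y + d.2)
        · subst hc; simp at hcv; omega
        · simp [hc] at hcv; exact hM.vbound c v hcv
      · intro e he
        rcases List.mem_cons.mp he with rfl | he'
        · exact ⟨hInRnbr, hch, hreal_new, ⟨ch, by simp, le_rfl⟩⟩
        · obtain ⟨i1, i2, i3, i4⟩ := hM.qmem e he'
          exact ⟨i1, i2, i3, vLE_mono hdecr i4⟩
      · refine ⟨(x + d.1, y + d.2, ch) :: F, B, ?_, ?_, hB⟩
        · rw [hq]; rfl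
        · intro e he
          rcases List.mem_cons.mp he with rfl | he'
          · rfl
          · exact hF e he'
      · simpa [hne_xy.symm] using hM.hxy
      · intro v hv
        by_cases hg : ((n - 1, n - 1) : Int × Int) = (x + d.1, y + d.2)
        · simp only [hg, if_pos] at hv
          refine ⟨(x + d.1, y + d.2, ch), List.mem_cons_self .., ?_⟩
          simp only [Prod.ext_iff] at hg ⊢
          simp at hv
          refine ⟨by omega, by omega, by omega⟩
        · simp only [if_neg hg] at hv
          obtain ⟨e, he, heq⟩ := hM.hgoal v hv
          exact ⟨e, List.mem_cons_of_mem _ he, heq⟩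
      · intro c v hcv hcxy
        by_cases hc : c = (x + d.1, y + d.2)
        · subst hc
          simp at hcv
          exact Or.inl ⟨(x + d.1, y + d.2, ch), List.mem_cons_self .., by rw [hcv]⟩
        · simp [hc] at hcv
          rcases hM.hcover c v hcv hcxy with ⟨e, he, heq⟩ | hrel
          · exact Or.inl ⟨e, List.mem_cons_of_mem _ he, heq⟩
          · exact Or.inr (relaxed_mono hdecr hrel)
      · intro _
        exact ⟨ch, by simp, by rw [hwn]; simp⟩
      · have hsum := sum_update (f := st.2) hmemc (some ch) (capA grid n)
        unfold PhiA
        simp only [List.length_cons]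
        change st.1.length + 1 +
            (∑ c ∈ cells n, capA grid n (if c = (x + d.1, y + d.2) then some ch else st.2 c))
          ≤ st.1.length + (∑ c ∈ cells n, capA grid n (st.2 c))
        cases hold : st.2 (x + d.1, y + d.2) with
        | none =>
          rw [hold, capA_none, capA_some] at hsum
          omega
        | some w =>
          rw [hold] at hlt; simp [pvLtInf] at hlt
          rw [hold, capA_some, capA_some] at hsum
          omega
  case neg =>
    have hwn : wN grid (x + d.1, y + d.2) = 1 := by simp [wN, hw]
    rw [if_neg hw]
    by_cases hlt : pvLtInf (ch + 1) (st.2 (x + d.1, y + d.2)) = true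
    case neg =>
      rw [if_neg hlt]
      refine ⟨hM, fun c w hw => ⟨w, hw, le_rfl⟩, ?_, le_rfl⟩
      intro _
      cases hv : st.2 (x + d.1, y + d.2) with
      | none => rw [hv] at hlt; simp [pvLtInf] at hlt
      | some w =>
        rw [hv] at hlt; simp [pvLtInf] at hlt
        exact ⟨w, rfl, by rw [hwn]; push_cast; omega⟩
    case pos =>
      rw [if_pos hlt]
      have hreal_new : Rch grid n (ch + 1).toNat (x + d.1, y + d.2) := by
        have := Rch.step hRxy hd hInRnbr
        rw [hwn] at this
        have he : ch.toNat + 1 = (ch + 1).toNat := by omega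
        rwa [he] at this
      have hdecr : decr st.2
          (fun c => if c = (x + d.1, y + d.2) then some (ch + 1) else st.2 c) := by
        intro c w hcw
        by_cases hc : c = (x + d.1, y + d.2)
        · subst hc
          rw [hcw] at hlt; simp [pvLtInf] at hlt
          exact ⟨ch + 1, by simp, le_of_lt hlt⟩
        · exact ⟨w, by simp [hc, hcw], le_rfl⟩
      have h00 : ((0, 0) : Int × Int) ≠ (x + d.1, y + d.2) := by
        intro h00
        rw [← h00, hM.vstart] at hlt
        simp [pvLtInf] at hlt
        omega
      refine ⟨⟨?_, ?_, ?_, ?_, ?_, ?_, ?_, ?_⟩, hdecr, ?_, ?_⟩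
      · simpa [h00] using hM.vstart
      · intro c v hcv
        by_cases hc : c = (x + d.1, y + d.2)
        · subst hc; simp at hcv; exact hcv ▸ ⟨by omega, hreal_new⟩
        · simp [hc] at hcv; exact hM.vreal c v hcv
      · intro c v hcv
        by_cases hc : c = (x + d.1, y + d.2)
        · subst hc; simp at hcv; omega
        · simp [hc] at hcv; exact hM.vbound c v hcv
      · intro e he
        rcases List.mem_append.mp he with he' | he'
        · obtain ⟨i1, i2, i3, i4⟩ := hM.qmem e he'
          exact ⟨i1, i2, i3, vLE_mono hdecr i4⟩
        · rcases List.mem_singleton.mp he' with rfl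
          exact ⟨hInRnbr, (by omega : (0 : Int) ≤ ch + 1), hreal_new, ⟨ch + 1, by simp, le_rfl⟩⟩
      · refine ⟨F, B ++ [(x + d.1, y + d.2, ch + 1)], ?_, hF, ?_⟩
        · rw [hq]; simp
        · intro e he
          rcases List.mem_append.mp he with he' | he'
          · exact hB e he'
          · rcases List.mem_singleton.mp he' with rfl
            rfl
      · simpa [hne_xy.symm] using hM.hxy
      · intro v hv
        by_cases hg : ((n - 1, n - 1) : Int × Int) = (x + d.1, y + d.2)
        · simp only [hg, if_pos] at hv
          refine ⟨(x + d.1, y + d.2, ch + 1), List.mem_append_right _ (by simp), ?_⟩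
          simp only [Prod.ext_iff] at hg ⊢
          simp at hv ⊢
          refine ⟨by omega, by omega, by omega⟩
        · simp only [if_neg hg] at hv
          obtain ⟨e, he, heq⟩ := hM.hgoal v hv
          exact ⟨e, List.mem_append_left _ he, heq⟩
      · intro c v hcv hcxy
        by_cases hc : c = (x + d.1, y + d.2)
        · subst hc
          simp at hcv
          exact Or.inl ⟨(x + d.1, y + d.2, ch + 1), List.mem_append_right _ (by simp),
            by rw [hcv]⟩
        · simp [hc] at hcv
          rcases hM.hcover c v hcv hcxy with ⟨e, he, heq⟩ | hrel
          · exact Or.inl ⟨e, List.mem_append_left _ he, heq⟩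
          · exact Or.inr (relaxed_mono hdecr hrel)
      · intro _
        exact ⟨ch + 1, by simp, by rw [hwn]; simp⟩
      · have hsum := sum_update (f := st.2) hmemc (some (ch + 1)) (capA grid n)
        unfold PhiA
        simp only [List.length_append, List.length_singleton]
        change st.1.length + 1 +
            (∑ c ∈ cells n,
              capA grid n (if c = (x + d.1, y + d.2) then some (ch + 1) else st.2 c))
          ≤ st.1.length + (∑ c ∈ cells n, capA grid n (st.2 c))
        cases hold : st.2 (x + d.1, y + d.2) with
        | none =>
          rw [hold, capA_none, capA_some] at hsum
          omega
        | some w =>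
          rw [hold] at hlt; simp [pvLtInf] at hlt
          rw [hold, capA_some, capA_some] at hsum
          omega

lemma relaxA_pres {grid : List (List Int)} {n x y ch : Int} {rest vis} (hn : 1 ≤ n)
    (hInv : InvA grid n ((x, y, ch) :: rest) vis)
    (hvis : vis (x, y) = some ch)
    (hgne : ¬(x = n - 1 ∧ y = n - 1)) :
    InvA grid n (pvDirs.foldl (pvStepA grid n x y ch) (rest, vis)).1
      (pvDirs.foldl (pvStepA grid n x y ch) (rest, vis)).2
    ∧ PhiA grid n (pvDirs.foldl (pvStepA grid n x y ch) (rest, vis)).1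
        (pvDirs.foldl (pvStepA grid n x y ch) (rest, vis)).2 ≤ PhiA grid n rest vis := by
  obtain ⟨hInR0, hch0, hRxy0, -⟩ := hInv.qmem (x, y, ch) (List.mem_cons_self ..)
  have hInR : InR n (x, y) := hInR0
  have hch : (0 : Int) ≤ ch := hch0
  have hRxy : Rch grid n ch.toNat (x, y) := hRxy0
  have hle := headA_le hn hInv
  have hminrest : ∀ e ∈ rest, ch ≤ e.2.2 := (List.pairwise_cons.mp hInv.qsorted).1
  have hsprest : ∀ e ∈ rest, e.2.2 ≤ ch + 1 := fun e he =>
    hInv.qspread e (List.mem_cons_of_mem _ he) (x, y, ch) (List.mem_cons_self ..)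
  have M0 : MidA grid n x y ch rest (rest, vis) := by
    refine ⟨hInv.vstart, hInv.vreal, hInv.vbound,
      fun e he => hInv.qmem e (List.mem_cons_of_mem _ he),
      ⟨[], [], by simp, by simp, by simp⟩, hvis, ?_, ?_⟩
    · intro v hv
      obtain ⟨e, he, heq⟩ := hInv.hgoal v hv
      rcases List.mem_cons.mp he with rfl | he'
      · exfalso
        simp only [Prod.ext_iff] at heq
        exact hgne ⟨heq.1, heq.2.1⟩
      · exact ⟨e, he', heq⟩
    · intro c v hcv hcne
      rcases hInv.hcover c v hcv with ⟨e, he, heq⟩ | hrel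
      · rcases List.mem_cons.mp he with rfl | he'
        · exfalso
          apply hcne
          simp only [Prod.ext_iff] at heq
          exact Prod.ext_iff.mpr ⟨heq.1.symm, heq.2.1.symm⟩
        · exact Or.inl ⟨e, he', heq⟩
      · exact Or.inr hrel
  simp only [pvDirs, List.foldl_cons, List.foldl_nil]
  obtain ⟨M1, dec1, prog1, phi1⟩ :=
    stepA_pres ((-1 : Int), (0 : Int)) (adj_dirs _ (by simp [pvDirs])) hch hRxy hle M0
  obtain ⟨M2, dec2, prog2, phi2⟩ :=
    stepA_pres ((1 : Int), (0 : Int)) (adj_dirs _ (by simp [pvDirs])) hch hRxy hle M1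
  obtain ⟨M3, dec3, prog3, phi3⟩ :=
    stepA_pres ((0 : Int), (-1 : Int)) (adj_dirs _ (by simp [pvDirs])) hch hRxy hle M2
  obtain ⟨M4, dec4, prog4, phi4⟩ :=
    stepA_pres ((0 : Int), (1 : Int)) (adj_dirs _ (by simp [pvDirs])) hch hRxy hle M3
  refine ⟨?_, le_trans phi4 (le_trans phi3 (le_trans phi2 phi1))⟩
  obtain ⟨F, B, hq4, hF, hB⟩ := M4.qform
  have hbounds : ∀ e ∈ (pvDirs.foldl (pvStepA grid n x y ch) (rest, vis)).1,
      ch ≤ e.2.2 ∧ e.2.2 ≤ ch + 1 := by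
    simp only [pvDirs, List.foldl_cons, List.foldl_nil]
    rw [hq4]
    intro e he
    rcases List.mem_append.mp he with he' | he'
    · rcases List.mem_append.mp he' with hf | hr
      · rw [hF e hf]; omega
      · exact ⟨hminrest e hr, hsprest e hr⟩
    · rw [hB e he']; omega
  simp only [pvDirs, List.foldl_cons, List.foldl_nil] at hbounds ⊢
  refine ⟨M4.vstart, M4.vreal, M4.vbound, M4.qmem, ?_, ?_, M4.hgoal, ?_⟩
  · rw [hq4]
    refine (List.pairwise_append).mpr ⟨(List.pairwise_append).mpr ⟨?_, ?_, ?_⟩, ?_, ?_⟩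
    · exact List.pairwise_of_forall_mem_list fun a ha b hb => by
        rw [hF a ha, hF b hb]
    · exact (List.pairwise_cons.mp hInv.qsorted).2
    · intro a ha b hb
      rw [hF a ha]
      exact hminrest b hb
    · exact List.pairwise_of_forall_mem_list fun a ha b hb => by
        rw [hB a ha, hB b hb]
    · intro a ha b hb
      rw [hB b hb]
      rcases List.mem_append.mp ha with hf | hr
      · rw [hF a hf]; omega
      · have := hsprest a hr; omega
  · intro a ha b hb
    have h1 := hbounds a ha
    have h2 := hbounds b hb
    omega
  · intro c v hcv
    by_cases hcx : c = (x, y)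
    · subst hcx
      rw [M4.hxy] at hcv
      have hv : v = ch := by simpa using hcv.symm
      subst hv
      refine Or.inr ?_
      intro c' hadj hinr
      rcases hadj with h | h | h | h <;> subst h
      · have := prog1
        have heq : ((x + -1, y + 0) : Int × Int) = ((x, y).1 - 1, (x, y).2) := by
          simp [Prod.ext_iff]; omega
        rw [heq] at this
        exact vLE_mono dec4 (vLE_mono dec3 (vLE_mono dec2 (this hinr)))
      · have := prog2
        have heq : ((x + 1, y + 0) : Int × Int) = ((x, y).1 + 1, (x, y).2) := by
          simp
        rw [heq] at this
        exact vLE_mono dec4 (vLE_mono dec3 (this hinr))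
      · have := prog3
        have heq : ((x + 0, y + -1) : Int × Int) = ((x, y).1, (x, y).2 - 1) := by
          simp [Prod.ext_iff]; omega
        rw [heq] at this
        exact vLE_mono dec4 (this hinr)
      · have := prog4
        have heq : ((x + 0, y + 1) : Int × Int) = ((x, y).1, (x, y).2 + 1) := by
          simp
        rw [heq] at this
        exact this hinr
    · exact M4.hcover c v hcv hcx

theorem loopA_eq {grid : List (List Int)} {n : Int} (hn : 1 ≤ n) :
    ∀ fuel (q : List (Int × Int × Int)) (vis : (Int × Int) → Option Int),
      InvA grid n q vis → PhiA grid n q vis < fuel →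
      pvLoopA grid n fuel q vis = (delta grid n (n - 1, n - 1) : Int) := by
  intro fuel
  induction fuel with
  | zero => exact fun q vis _ hP => absurd hP (Nat.not_lt_zero _)
  | succ f ih =>
    intro q vis hI hP
    rcases q with _ | ⟨⟨x, y, ch⟩, rest⟩
    · exact (not_emptyA hn hI).elim
    obtain ⟨hInR0, hch0, hRxy0, hvle0⟩ := hI.qmem (x, y, ch) (List.mem_cons_self ..)
    have hRxy : Rch grid n ch.toNat (x, y) := hRxy0
    have hch : (0 : Int) ≤ ch := hch0
    have hvle : vLE (vis (x, y)) ch := hvle0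
    obtain ⟨v, hv, hvch⟩ := hvle
    have hlen : PhiA grid n ((x, y, ch) :: rest) vis = PhiA grid n rest vis + 1 := by
      unfold PhiA; simp [List.length_cons]; omega
    simp only [pvLoopA]
    by_cases hskip : pvGtInf ch (vis (x, y)) = true
    · rw [if_pos hskip]
      have hlt : v < ch := by rw [hv] at hskip; simpa [pvGtInf] using hskip
      refine ih rest vis ⟨hI.vstart, hI.vreal, hI.vbound,
        fun e he => hI.qmem e (List.mem_cons_of_mem _ he),
        (List.pairwise_cons.mp hI.qsorted).2,
        fun a ha b hb => hI.qspread a (List.mem_cons_of_mem _ ha) b (List.mem_cons_of_mem _ hb),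
        ?_, ?_⟩ (by omega)
      · intro v' hv'
        obtain ⟨e, he, heq⟩ := hI.hgoal v' hv'
        rcases List.mem_cons.mp he with rfl | he'
        · exfalso
          simp [Prod.ext_iff] at heq
          obtain ⟨hx, hy, hc⟩ := heq
          rw [show ((x, y) : Int × Int) = (n - 1, n - 1) from by
            simp [Prod.ext_iff]; omega] at hv
          rw [hv'] at hv
          have : v' = v := by simpa using hv
          omega
        · exact ⟨e, he', heq⟩
      · intro c v' hv' 
        rcases hI.hcover c v' hv' with ⟨e, he, heq⟩ | hrel
        · rcases List.mem_cons.mp he with rfl | he'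
          · exfalso
            simp [Prod.ext_iff] at heq
            obtain ⟨hx, hy, hc⟩ := heq
            rw [show c = ((x, y) : Int × Int) from by simp [Prod.ext_iff]; omega] at hv'
            rw [hv'] at hv
            have : v' = v := by simpa using hv
            omega
          · exact Or.inl ⟨e, he', heq⟩
        · exact Or.inr hrel
    · rw [if_neg hskip]
      have hchv : v = ch := by
        rw [hv] at hskip
        simp [pvGtInf] at hskip
        omega
      subst hchv
      by_cases hg : x = n - 1 ∧ y = n - 1
      · rw [if_pos hg]
        obtain ⟨hx, hy⟩ := hg
        subst hx; subst hy
        have h1 : delta grid n (n - 1, n - 1) ≤ v.toNat := delta_le hRxy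
        have h2 := headA_le hn hI
        omega
      · rw [if_neg hg]
        obtain ⟨hI', hPhi⟩ := relaxA_pres hn hI hv hg
        exact ih _ _ hI' (by omega)

theorem A_main {grid : List (List Int)} {n : Int} (hn : 1 ≤ n) :
    min_black_to_white grid n = (delta grid n (n - 1, n - 1) : Int) := by
  unfold min_black_to_white
  have hI : InvA grid n [(0, 0, 0)] (fun c => if c = (0, 0) then some 0 else none) := by
    refine ⟨by simp, ?_, ?_, ?_, by simp, ?_, ?_, ?_⟩
    · intro c v h
      by_cases hc : c = ((0 : Int), (0 : Int))
      · subst hc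
        simp at h
        exact ⟨by omega, by rw [← h]; exact Rch.zero⟩
      · simp [hc] at h
    · intro c v h
      by_cases hc : c = ((0 : Int), (0 : Int))
      · subst hc; simp at h; omega
      · simp [hc] at h
    · intro e he
      rcases List.mem_singleton.mp he with rfl
      exact ⟨(⟨by omega, by omega, by omega, by omega⟩ : InR n ((0 : Int), (0 : Int))),
        (le_rfl : (0 : Int) ≤ 0), Rch.zero, ⟨0, by simp, le_rfl⟩⟩
    · intro a ha b hb
      rcases List.mem_singleton.mp ha with rfl
      rcases List.mem_singleton.mp hb with rfl
      omega
    · intro v hv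
      by_cases hg : ((n - 1, n - 1) : Int × Int) = ((0 : Int), (0 : Int))
      · rw [hg] at hv
        simp at hv
        simp [Prod.ext_iff] at hg
        exact ⟨(0, 0, 0), List.mem_singleton.mpr rfl, by simp [Prod.ext_iff]; omega⟩
      · simp [hg] at hv
    · intro c v hv
      by_cases hc : c = ((0 : Int), (0 : Int))
      · subst hc
        simp at hv
        exact Or.inl ⟨(0, 0, 0), List.mem_singleton.mpr rfl, by simp [Prod.ext_iff]; omega⟩
      · simp [hc] at hv
  apply loopA_eq hn _ _ _ hI
  -- fuel bound
  have hD := delta_goal_bound (grid := grid) hn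
  set m := n.toNat with hm
  set D := delta grid n (n - 1, n - 1) with hDdef
  have hcap : ∀ c ∈ cells n,
      capA grid n ((fun c => if c = ((0 : Int), (0 : Int)) then some 0 else none) c) ≤ D + 3 := by
    intro c _
    by_cases hc : c = ((0 : Int), (0 : Int)) <;> simp only [hc, if_true, if_false, capA_some, capA_none] <;> omega
  have hsum := Finset.sum_le_card_nsmul (cells n) _ _ hcap
  have hcard : (cells n).card ≤ m * m := card_cells
  have hsum2 : (∑ c ∈ cells n,
      capA grid n ((fun c => if c = ((0 : Int), (0 : Int)) then some 0 else none) c))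
      ≤ m * m * (D + 3) := by
    calc _ ≤ (cells n).card * (D + 3) := by simpa [smul_eq_mul] using hsum
      _ ≤ m * m * (D + 3) := Nat.mul_le_mul_right _ hcard
  have hDm : D + 2 ≤ 2 * m := by omega
  have hm1 : 1 ≤ m := by omega
  have hfin : 1 + m * m * (D + 3) < (m * m + 2) * (m * m + 2) := by
    zify at hDm hm1 ⊢
    nlinarith [sq_nonneg ((m : ℤ) * m - m), sq_nonneg ((m : ℤ) * m),
      mul_le_mul_of_nonneg_left hDm (by positivity : (0 : ℤ) ≤ (m : ℤ) * (m : ℤ))]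
  have : PhiA grid n [(0, 0, 0)] (fun c => if c = (0, 0) then some 0 else none)
      ≤ 1 + m * m * (D + 3) := by
    unfold PhiA
    simpa using hsum2
  calc PhiA grid n [(0, 0, 0)] (fun c => if c = (0, 0) then some 0 else none)
      ≤ 1 + m * m * (D + 3) := this
    _ < (m * m + 2) * (m * m + 2) := hfin
    _ = pvFuelA n := by rw [pvFuelA]

-- B side

def countB (n : Int) (dist : (Int × Int) → Option Int) : ℕ :=
  ((cells n).filter (fun c => (dist c).isSome)).card

/-- No relaxation applies anywhere: `dist` is a fixpoint. -/
def FixB (grid : List (List Int)) (n : Int) (dist : (Int × Int) → Option Int) : Prop :=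
  ∀ c v, dist c = some v → RelaxedAt grid n dist c v

structure InvB (grid : List (List Int)) (n : Int) (dist : (Int × Int) → Option Int) : Prop where
  dstart : dist (0, 0) = some 0
  dmem : ∀ c v, dist c = some v → c ∈ cells n
  dreal : ∀ c v, dist c = some v → 0 ≤ v ∧ Rch grid n v.toNat c
  dcount : ∀ c v, dist c = some v → v < (countB n dist : Int)

def capB (n : Int) (v : Option Int) : ℕ :=
  match v with
  | none => n.toNat * n.toNat + 1
  | some w => w.toNat + 1

def PhiB (n : Int) (dist : (Int × Int) → Option Int) : ℕ :=
  ∑ c ∈ cells n, capB n (dist c)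

lemma wB_cast {grid : List (List Int)} {a b : Int} :
    (if pvGrid grid a b = some 1 then (0 : Int) else 1) = ((wN grid (a, b) : ℕ) : Int) := by
  unfold wN; split <;> simp

lemma foldl_inv3 {α β : Type} (P : β → Prop) (m : β → ℕ) (fl : β → Bool) (f : β → α → β)
    (hf : ∀ s a, P s → P (f s a) ∧ m (f s a) ≤ m s ∧
      (fl (f s a) = true → fl s = true ∨ m (f s a) < m s)) :
    ∀ (l : List α) (s : β), P s → P (l.foldl f s) ∧ m (l.foldl f s) ≤ m s ∧
      (fl (l.foldl f s) = true → fl s = true ∨ m (l.foldl f s) < m s) := by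
  intro l
  induction l with
  | nil => exact fun s hs => ⟨hs, le_rfl, fun h => Or.inl h⟩
  | cons a l ih =>
    intro s hs
    simp only [List.foldl_cons]
    obtain ⟨h1, h2, h3⟩ := hf s a hs
    obtain ⟨i1, i2, i3⟩ := ih (f s a) h1
    refine ⟨i1, le_trans i2 h2, ?_⟩
    intro hfl
    rcases i3 hfl with hfl' | hlt
    · rcases h3 hfl' with h | h
      · exact Or.inl h
      · exact Or.inr (by omega)
    · exact Or.inr (by omega)

lemma foldl_noflag {α β : Type} (fl : β → Bool) (f : β → α → β)
    (hf : ∀ s a, fl (f s a) = false → f s a = s) :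
    ∀ (l : List α) (s : β), fl (l.foldl f s) = false →
      l.foldl f s = s ∧ ∀ a ∈ l, f s a = s := by
  intro l
  induction l with
  | nil => exact fun s _ => ⟨rfl, by simp⟩
  | cons a l ih =>
    intro s h
    simp only [List.foldl_cons] at h ⊢
    obtain ⟨ih1, ih2⟩ := ih (f s a) h
    have hfa : fl (f s a) = false := by rw [ih1] at h; exact h
    have hsa : f s a = s := hf s a hfa
    refine ⟨by rw [ih1, hsa], ?_⟩
    intro b hb
    rcases List.mem_cons.mp hb with rfl | hb'
    · exact hsa
    · have := ih2 b hb'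
      rwa [hsa] at this

lemma stepB_id {grid : List (List Int)} {n d : Int} {st} {p : Int × Int}
    (h : (pvStepB grid n d st p).2 = false) : pvStepB grid n d st p = st := by
  simp only [pvStepB] at h ⊢
  split_ifs at h ⊢ <;> simp_all

lemma cellB_id {grid : List (List Int)} {n : Int} {st} {x y : Int}
    (h : (pvCellB grid n st x y).2 = false) : pvCellB grid n st x y = st := by
  unfold pvCellB at h ⊢
  cases hxy : st.1 (x, y) with
  | none => rfl
  | some d =>
    rw [hxy] at h
    exact (foldl_noflag _ _ (fun s a hb => stepB_id hb) _ _ h).1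

lemma countB_le {n : Int} {dist : (Int × Int) → Option Int} :
    countB n dist ≤ n.toNat * n.toNat :=
  le_trans (Finset.card_filter_le _ _) card_cells

lemma capB_none {n : Int} : capB n none = n.toNat * n.toNat + 1 := rfl
lemma capB_some {n w : Int} : capB n (some w) = w.toNat + 1 := rfl

lemma stepB_pres {grid : List (List Int)} {n d x y a b : Int} {st}
    (hI : InvB grid n st.1) (hxy : st.1 (x, y) = some d) (hd0 : 0 ≤ d)
    (hR : Rch grid n d.toNat (x, y)) (hp : Adj (x, y) (a, b)) :
    InvB grid n (pvStepB grid n d st (a, b)).1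
    ∧ (pvStepB grid n d st (a, b)).1 (x, y) = some d
    ∧ PhiB n (pvStepB grid n d st (a, b)).1 ≤ PhiB n st.1
    ∧ ((pvStepB grid n d st (a, b)).2 = true →
        st.2 = true ∨ PhiB n (pvStepB grid n d st (a, b)).1 < PhiB n st.1) := by
  have hne : ((a, b) : Int × Int) ≠ (x, y) := adj_ne hp
  unfold pvStepB
  simp only []
  by_cases hin : 0 ≤ a ∧ a < n ∧ 0 ≤ b ∧ b < n
  case neg =>
    rw [if_neg hin]
    exact ⟨hI, hxy, le_rfl, fun h => Or.inl h⟩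
  case pos =>
  have hInR : InR n ((a, b) : Int × Int) := hin
  have hmemc : ((a, b) : Int × Int) ∈ cells n := mem_cells.mpr hInR
  rw [if_pos hin]
  rw [wB_cast (grid := grid)]
  by_cases hlt : pvLtInf (d + (wN grid (a, b) : Int)) (st.1 (a, b)) = true
  case neg =>
    rw [if_neg hlt]
    exact ⟨hI, hxy, le_rfl, fun h => Or.inl h⟩
  case pos =>
  rw [if_pos hlt]
  dsimp only
  have hw1 : wN grid (a, b) ≤ 1 := wN_le_one
  have hnd0 : (0 : Int) ≤ d + (wN grid (a, b) : Int) := by positivity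
  have hndR : Rch grid n (d + (wN grid (a, b) : Int)).toNat (a, b) := by
    have := Rch.step hR hp hInR
    have he : d.toNat + wN grid (a, b) = (d + (wN grid (a, b) : Int)).toNat := by omega
    rwa [he] at this
  have hdc : d < (countB n st.1 : Int) := hI.dcount _ _ hxy
  have hcount : (countB n st.1 : Int) ≤
        (countB n (fun c => if c = (a, b) then some (d + (wN grid (a, b) : Int)) else st.1 c) : Int)
      ∧ (d + (wN grid (a, b) : Int)) <
        (countB n (fun c => if c = (a, b) then some (d + (wN grid (a, b) : Int)) else st.1 c) : Int) := by
    cases hold : st.1 (a, b) with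
    | none =>
      have hfil : ((cells n).filter
            (fun c => (if c = (a, b) then some (d + (wN grid (a, b) : Int)) else st.1 c).isSome))
          = insert ((a, b) : Int × Int) ((cells n).filter (fun c => (st.1 c).isSome)) := by
        ext c
        simp only [Finset.mem_filter, Finset.mem_insert]
        by_cases hc : c = ((a, b) : Int × Int)
        · subst hc; simp [hold, hmemc]
        · simp [hc]
      have hnotmem : ((a, b) : Int × Int) ∉ (cells n).filter (fun c => (st.1 c).isSome) := by
        simp [hold]
      have : countB n (fun c => if c = (a, b) then some (d + (wN grid (a, b) : Int)) else st.1 c)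
          = countB n st.1 + 1 := by
        unfold countB
        rw [hfil, Finset.card_insert_of_notMem hnotmem]
      omega
    | some w0 =>
      have hfil : ((cells n).filter
            (fun c => (if c = (a, b) then some (d + (wN grid (a, b) : Int)) else st.1 c).isSome))
          = (cells n).filter (fun c => (st.1 c).isSome) := by
        ext c
        simp only [Finset.mem_filter]
        by_cases hc : c = ((a, b) : Int × Int)
        · subst hc; simp [hold]
        · simp [hc]
      have heqc : countB n (fun c => if c = (a, b) then some (d + (wN grid (a, b) : Int)) else st.1 c)
          = countB n st.1 := by
        unfold countB; rw [hfil]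
      rw [hold] at hlt
      simp [pvLtInf] at hlt
      have hw0c : w0 < (countB n st.1 : Int) := hI.dcount _ _ hold
      omega
  refine ⟨⟨?_, ?_, ?_, ?_⟩, ?_, ?_, ?_⟩
  · have h00 : ((0, 0) : Int × Int) ≠ (a, b) := by
      intro h00
      rw [← h00, hI.dstart] at hlt
      simp [pvLtInf] at hlt
      omega
    simpa [h00] using hI.dstart
  · intro c v hcv
    by_cases hc : c = ((a, b) : Int × Int)
    · subst hc; exact hmemc
    · simp [hc] at hcv; exact hI.dmem c v hcv
  · intro c v hcv
    by_cases hc : c = ((a, b) : Int × Int)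
    · subst hc; simp at hcv; exact hcv ▸ ⟨hnd0, hndR⟩
    · simp [hc] at hcv; exact hI.dreal c v hcv
  · intro c v hcv
    by_cases hc : c = ((a, b) : Int × Int)
    · subst hc; simp at hcv; omega
    · simp [hc] at hcv
      have := hI.dcount c v hcv
      omega
  · simpa [hne.symm] using hxy
  · have hsum := sum_update (f := st.1) hmemc (some (d + (wN grid (a, b) : Int))) (capB n)
    unfold PhiB
    change (∑ c ∈ cells n,
        capB n (if c = (a, b) then some (d + (wN grid (a, b) : Int)) else st.1 c))
      ≤ ∑ c ∈ cells n, capB n (st.1 c)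
    have hcb : countB n (fun c => if c = (a, b) then some (d + (wN grid (a, b) : Int)) else st.1 c)
        ≤ n.toNat * n.toNat := countB_le
    cases hold : st.1 (a, b) with
    | none =>
      rw [hold, capB_none, capB_some] at hsum
      omega
    | some w0 =>
      rw [hold] at hlt
      simp [pvLtInf] at hlt
      rw [hold, capB_some, capB_some] at hsum
      omega
  · intro _
    refine Or.inr ?_
    have hsum := sum_update (f := st.1) hmemc (some (d + (wN grid (a, b) : Int))) (capB n)
    unfold PhiB
    change (∑ c ∈ cells n,
        capB n (if c = (a, b) then some (d + (wN grid (a, b) : Int)) else st.1 c))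
      < ∑ c ∈ cells n, capB n (st.1 c)
    have hcb : countB n (fun c => if c = (a, b) then some (d + (wN grid (a, b) : Int)) else st.1 c)
        ≤ n.toNat * n.toNat := countB_le
    cases hold : st.1 (a, b) with
    | none =>
      rw [hold, capB_none, capB_some] at hsum
      omega
    | some w0 =>
      rw [hold] at hlt
      simp [pvLtInf] at hlt
      rw [hold, capB_some, capB_some] at hsum
      omega

lemma cellB_pres {grid : List (List Int)} {n : Int} {st} (x y : Int)
    (hI : InvB grid n st.1) :
    InvB grid n (pvCellB grid n st x y).1
    ∧ PhiB n (pvCellB grid n st x y).1 ≤ PhiB n st.1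
    ∧ ((pvCellB grid n st x y).2 = true →
        st.2 = true ∨ PhiB n (pvCellB grid n st x y).1 < PhiB n st.1) := by
  unfold pvCellB
  cases hxy : st.1 (x, y) with
  | none => exact ⟨hI, le_rfl, fun h => Or.inl h⟩
  | some d =>
    obtain ⟨hd0, hR⟩ := hI.dreal _ _ hxy
    simp only [List.foldl_cons, List.foldl_nil]
    obtain ⟨I1, K1, P1, F1⟩ := stepB_pres (a := x - 1) (b := y) hI hxy hd0 hR (Or.inl (by simp))
    obtain ⟨I2, K2, P2, F2⟩ := stepB_pres (a := x + 1) (b := y) I1 K1 hd0 hR (Or.inr (Or.inl (by simp)))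
    obtain ⟨I3, K3, P3, F3⟩ := stepB_pres (a := x) (b := y - 1) I2 K2 hd0 hR (Or.inr (Or.inr (Or.inl (by simp))))
    obtain ⟨I4, K4, P4, F4⟩ := stepB_pres (a := x) (b := y + 1) I3 K3 hd0 hR (Or.inr (Or.inr (Or.inr (by simp))))
    refine ⟨I4, le_trans P4 (le_trans P3 (le_trans P2 P1)), ?_⟩
    intro hfl
    rcases F4 hfl with h | h
    · rcases F3 h with h1 | h1
      · rcases F2 h1 with h2 | h2
        · rcases F1 h2 with h3 | h3
          · exact Or.inl h3
          · exact Or.inr (by omega)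
        · exact Or.inr (by omega)
      · exact Or.inr (by omega)
    · exact Or.inr (by omega)

lemma sweepB_pres {grid : List (List Int)} {n : Int} {st} (hI : InvB grid n st.1) :
    InvB grid n (pvSweepB grid n st).1
    ∧ PhiB n (pvSweepB grid n st).1 ≤ PhiB n st.1
    ∧ ((pvSweepB grid n st).2 = true →
        st.2 = true ∨ PhiB n (pvSweepB grid n st).1 < PhiB n st.1) := by
  unfold pvSweepB
  exact foldl_inv3 (fun st => InvB grid n st.1) (fun st => PhiB n st.1) (fun st => st.2) _
    (fun s x hs => foldl_inv3 (fun st => InvB grid n st.1) (fun st => PhiB n st.1)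
      (fun st => st.2) _ (fun s2 y hs2 => cellB_pres x y hs2) _ s hs) _ st hI

lemma sweepB_false {grid : List (List Int)} {n : Int} {dist : (Int × Int) → Option Int}
    (h : (pvSweepB grid n (dist, false)).2 = false) :
    pvSweepB grid n (dist, false) = (dist, false)
    ∧ ∀ x ∈ PySem.List.pyRange 0 n 1, ∀ y ∈ PySem.List.pyRange 0 n 1,
        pvCellB grid n (dist, false) x y = (dist, false) := by
  unfold pvSweepB at h ⊢
  have houter := foldl_noflag (fun st => st.2)
    (fun st x => (PySem.List.pyRange 0 n 1).foldl (fun st y => pvCellB grid n st x y) st)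
    (fun s a hfa => (foldl_noflag _ _ (fun s2 b hb => cellB_id hb) _ _ hfa).1) _ _ h
  refine ⟨houter.1, ?_⟩
  intro x hx y hy
  have hxeq := houter.2 x hx
  have hflx : ((PySem.List.pyRange 0 n 1).foldl
      (fun st y => pvCellB grid n st x y) (dist, false)).2 = false := by
    exact congrArg Prod.snd hxeq
  exact (foldl_noflag _ _ (fun s2 b hb => cellB_id hb) _ _ hflx).2 y hy

lemma sweepB_fix {grid : List (List Int)} {n : Int} {dist : (Int × Int) → Option Int}
    (hI : InvB grid n dist)
    (h : (pvSweepB grid n (dist, false)).2 = false) :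
    FixB grid n dist := by
  obtain ⟨-, hcells⟩ := sweepB_false h
  rintro ⟨cx, cy⟩ v hcv c' hadj hinr
  have hin : InR n ((cx, cy) : Int × Int) := mem_cells.mp (hI.dmem _ _ hcv)
  have hx : cx ∈ PySem.List.pyRange 0 n 1 :=
    (PySem.List.mem_pyRange_one).mpr ⟨hin.1, hin.2.1⟩
  have hy : cy ∈ PySem.List.pyRange 0 n 1 :=
    (PySem.List.mem_pyRange_one).mpr ⟨hin.2.2.1, hin.2.2.2⟩
  have hcell := hcells cx hx cy hy
  unfold pvCellB at hcell
  dsimp only at hcell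
  rw [hcv] at hcell
  dsimp only at hcell
  have hstep : ∀ p ∈ [((cx : Int) - 1, (cy : Int)), (cx + 1, cy), (cx, cy - 1), (cx, cy + 1)],
      pvStepB grid n v (dist, false) p = (dist, false) := by
    have hfl : (([((cx : Int) - 1, (cy : Int)), (cx + 1, cy), (cx, cy - 1), (cx, cy + 1)]).foldl
        (pvStepB grid n v) (dist, false)).2 = false := by
      rw [hcell]
    exact (foldl_noflag _ _ (fun s2 b hb => stepB_id hb) _ _ hfl).2
  have hone : ∀ a b : Int, InR n ((a, b) : Int × Int) →
      pvStepB grid n v (dist, false) (a, b) = (dist, false) →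
      vLE (dist (a, b)) (v + (wN grid (a, b) : Int)) := by
    intro a b hinr2 heq
    have hinc : 0 ≤ a ∧ a < n ∧ 0 ≤ b ∧ b < n := hinr2
    unfold pvStepB at heq
    simp only [] at heq
    rw [if_pos hinc, wB_cast (grid := grid)] at heq
    by_cases hlt : pvLtInf (v + (wN grid (a, b) : Int)) (dist (a, b)) = true
    · rw [if_pos hlt] at heq
      have := congrArg Prod.snd heq
      simp at this
    · cases hv2 : dist (a, b) with
      | none => rw [hv2] at hlt; simp [pvLtInf] at hlt
      | some w =>
        rw [hv2] at hlt
        simp [pvLtInf] at hlt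
        exact ⟨w, rfl, hlt⟩
  rcases hadj with h1 | h1 | h1 | h1 <;> subst h1
  · exact hone _ _ hinr (hstep _ (by simp))
  · exact hone _ _ hinr (hstep _ (by simp))
  · exact hone _ _ hinr (hstep _ (by simp))
  · exact hone _ _ hinr (hstep _ (by simp))

lemma loopB_fix {grid : List (List Int)} {n : Int} :
    ∀ (fuel : ℕ) (dist : (Int × Int) → Option Int), InvB grid n dist → PhiB n dist < fuel →
      InvB grid n (pvLoopB grid n fuel dist) ∧ FixB grid n (pvLoopB grid n fuel dist) := by
  intro fuel
  induction fuel with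
  | zero => exact fun dist _ hP => absurd hP (Nat.not_lt_zero _)
  | succ f ih =>
    intro dist hI hP
    simp only [pvLoopB]
    obtain ⟨hI2, hPhi, hflag⟩ := sweepB_pres (st := (dist, false)) hI
    dsimp only at hPhi hflag
    by_cases hfl : (pvSweepB grid n (dist, false)).2 = true
    · rw [if_pos hfl]
      rcases hflag hfl with h | h
      · simp at h
      · exact ih _ hI2 (by omega)
    · rw [if_neg hfl]
      have hfl2 : (pvSweepB grid n (dist, false)).2 = false := by
        simpa using hfl
      have hfix := sweepB_fix hI hfl2
      have heq := (sweepB_false hfl2).1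
      rw [heq]
      exact ⟨hI, hfix⟩

lemma fix_le {grid : List (List Int)} {n : Int} {dist : (Int × Int) → Option Int}
    (hfix : FixB grid n dist) (hstart : dist (0, 0) = some 0) :
    ∀ {k c}, Rch grid n k c → vLE (dist c) (k : Int) := by
  intro k c hr
  induction hr with
  | zero => exact ⟨0, hstart, by simp⟩
  | @step k c c' hr hadj hinr ih =>
    obtain ⟨w, hw, hwk⟩ := ih
    obtain ⟨w2, hw2, hle⟩ := hfix c w hw c' hadj hinr
    exact ⟨w2, hw2, by push_cast at hle ⊢; omega⟩

theorem B_main {grid : List (List Int)} {n : Int} (hn : 1 ≤ n) :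
    min_black_to_white_alt grid n = (delta grid n (n - 1, n - 1) : Int) := by
  unfold min_black_to_white_alt
  have hI0 : InvB grid n (fun c => if c = (0, 0) then some 0 else none) := by
    have hmem00 : ((0, 0) : Int × Int) ∈ cells n :=
      mem_cells.mpr ⟨le_rfl, by omega, le_rfl, by omega⟩
    refine ⟨by simp, ?_, ?_, ?_⟩
    · intro c v h
      by_cases hc : c = ((0 : Int), (0 : Int))
      · subst hc; exact hmem00
      · simp [hc] at h
    · intro c v h
      by_cases hc : c = ((0 : Int), (0 : Int))
      · subst hc; simp at h
        exact ⟨by omega, by rw [← h]; exact Rch.zero⟩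
      · simp [hc] at h
    · intro c v h
      by_cases hc : c = ((0 : Int), (0 : Int))
      · subst hc
        simp at h
        have hpos : 0 < countB n (fun c => if c = ((0 : Int), (0 : Int)) then some 0 else none) := by
          refine Finset.card_pos.mpr ⟨(0, 0), ?_⟩
          simp [Finset.mem_filter, hmem00]
        omega
      · simp [hc] at h
  have hPhi0 : PhiB n (fun c => if c = (0, 0) then some 0 else none) < pvFuelB n := by
    have hcap : ∀ c ∈ cells n,
        capB n ((fun c => if c = ((0 : Int), (0 : Int)) then some 0 else none) c)
          ≤ n.toNat * n.toNat + 1 := by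
      intro c _
      by_cases hc : c = ((0 : Int), (0 : Int)) <;> simp only [hc, if_true, if_false, capB_some, capB_none] <;> omega
    have hsum := Finset.sum_le_card_nsmul (cells n) _ _ hcap
    have hcard : (cells n).card ≤ n.toNat * n.toNat := card_cells
    unfold PhiB pvFuelB
    calc (∑ c ∈ cells n, capB n ((fun c => if c = ((0 : Int), (0 : Int)) then some 0 else none) c))
        ≤ (cells n).card * (n.toNat * n.toNat + 1) := by simpa [smul_eq_mul] using hsum
      _ ≤ n.toNat * n.toNat * (n.toNat * n.toNat + 1) := Nat.mul_le_mul_right _ hcard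
      _ < n.toNat * n.toNat * (n.toNat * n.toNat + 2) + 2 := by
          have := Nat.mul_le_mul_left (n.toNat * n.toNat)
            (show n.toNat * n.toNat + 1 ≤ n.toNat * n.toNat + 2 by omega)
          omega
  obtain ⟨hI2, hfix⟩ := loopB_fix (pvFuelB n) _ hI0 hPhi0
  have hg : InR n ((n - 1, n - 1) : Int × Int) := ⟨by omega, by omega, by omega, by omega⟩
  have hne : ∃ k, Rch grid n k ((n - 1, n - 1) : Int × Int) :=
    (reach_exists _ hg).imp fun k hk => hk.2
  obtain ⟨v, hv, hvk⟩ := fix_le hfix hI2.dstart (rch_delta hne)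
  obtain ⟨hv0, hvr⟩ := hI2.dreal _ _ hv
  have hge : delta grid n (n - 1, n - 1) ≤ v.toNat := delta_le hvr
  simp only [hv]
  omega

-- ===== VERDICT (by name: the statement is the Claim_ definition above) =====
theorem min_black_to_white_spec : Claim_equal_min_black_to_white := by
  intro grid n _hdom hpre
  unfold Spec_min_black_to_white
  rw [A_main hpre.1, B_main hpre.1]
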